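-- pv_equiv track=rewrite | github.com/sdf1444/CMT-303-Software-Engineering | src/core/engine.py | classify_grades
-- ===== SOURCE A (Python) =====
-- def classify_grades(grades_list):
--     fail_sum = 0
--     pass_sum = 0
--     merit_sum = 0
--     dist_sum = 0
--
--     for i in grades_list:
--         if i < 50:
--             fail_sum += 1
--         elif i >=50 and i < 60:
--             pass_sum += 1
--         elif i >= 60 and i < 70:
--             merit_sum += 1
--         elif i >= 70:
--             dist_sum += 1
--     return [fail_sum, pass_sum, merit_sum, dist_sum]
-- ===== SOURCE B (Python) =====
-- def classify_grades(grades_list):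
--     # Staged passes: cumulative "below threshold" counts, bins by differences.
--     n = len(grades_list)
--     b50 = sum(1 for g in grades_list if g < 50)
--     b60 = sum(1 for g in grades_list if g < 60)
--     b70 = sum(1 for g in grades_list if g < 70)
--     return [b50, b60 - b50, b70 - b60, n - b70]
-- ===== Notes on version B (the rewrite author's own statement) =====
-- stated objective: alternative
-- what changed: Replaces A's single pass with a four-way elif cascade and four counters by three staged threshold-counting passes (counts below 50/60/70) from which the four bins are recovered as cumulative-count differences; correct because the bins are consecutive half-open intervals.
import Mathlib
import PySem

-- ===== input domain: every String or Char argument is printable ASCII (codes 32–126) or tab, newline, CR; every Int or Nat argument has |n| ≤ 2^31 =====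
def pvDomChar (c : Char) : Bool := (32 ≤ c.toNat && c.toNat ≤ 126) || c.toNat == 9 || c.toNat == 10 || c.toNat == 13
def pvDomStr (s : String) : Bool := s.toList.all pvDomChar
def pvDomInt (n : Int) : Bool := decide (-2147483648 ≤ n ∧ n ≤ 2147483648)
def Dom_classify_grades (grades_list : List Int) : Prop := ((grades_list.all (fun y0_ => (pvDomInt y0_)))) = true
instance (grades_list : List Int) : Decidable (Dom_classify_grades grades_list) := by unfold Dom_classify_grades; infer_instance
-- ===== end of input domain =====

-- B replaces A's elif cascade (one pass, four counters) with three staged threshold-counting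
-- passes and bin recovery by cumulative-count differences; same O(n), different decomposition.


-- ===== PORT A =====
def classify_grades (grades_list : List Int) : List Int :=
  let s := grades_list.foldl (fun (st : Int × Int × Int × Int) i =>
    if i < 50 then (st.1 + 1, st.2.1, st.2.2.1, st.2.2.2)
    else if 50 ≤ i ∧ i < 60 then (st.1, st.2.1 + 1, st.2.2.1, st.2.2.2)
    else if 60 ≤ i ∧ i < 70 then (st.1, st.2.1, st.2.2.1 + 1, st.2.2.2)
    else if 70 ≤ i then (st.1, st.2.1, st.2.2.1, st.2.2.2 + 1)
    else st) (0, 0, 0, 0)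
  [s.1, s.2.1, s.2.2.1, s.2.2.2]

-- ===== PORT B =====
-- 'sum(1 for g in … if g < t)' ported as countP (cast to Int), one pass per threshold.
def classify_grades_alt (grades_list : List Int) : List Int :=
  let n : Int := grades_list.length
  let b50 : Int := grades_list.countP (fun g => g < 50)
  let b60 : Int := grades_list.countP (fun g => g < 60)
  let b70 : Int := grades_list.countP (fun g => g < 70)
  [b50, b60 - b50, b70 - b60, n - b70]

-- ===== PRECONDITION & SPEC =====
def Spec_classify_grades (grades_list : List Int) (out : List Int) : Prop := out = classify_grades_alt grades_list
instance (grades_list : List Int) (out : List Int) : Decidable (Spec_classify_grades grades_list out) := by unfold Spec_classify_grades; infer_instance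

-- ===== CLAIM (what is proved, stated in full; the proofs are below) =====
def Claim_equal_classify_grades : Prop := ∀ (grades_list : List Int), Dom_classify_grades grades_list → Spec_classify_grades grades_list (classify_grades grades_list)

-- ===== LEMMAS AND PROOFS =====
-- Invariant for A's fold: each counter accumulates the count of its (disjoint) bin.
lemma classify_grades_fold (l : List Int) (f p m d : Int) :
    l.foldl (fun (st : Int × Int × Int × Int) i =>
      if i < 50 then (st.1 + 1, st.2.1, st.2.2.1, st.2.2.2)
      else if 50 ≤ i ∧ i < 60 then (st.1, st.2.1 + 1, st.2.2.1, st.2.2.2)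
      else if 60 ≤ i ∧ i < 70 then (st.1, st.2.1, st.2.2.1 + 1, st.2.2.2)
      else if 70 ≤ i then (st.1, st.2.1, st.2.2.1, st.2.2.2 + 1)
      else st) (f, p, m, d) =
    (f + l.countP (fun g => g < 50),
     p + l.countP (fun g => 50 ≤ g ∧ g < 60),
     m + l.countP (fun g => 60 ≤ g ∧ g < 70),
     d + l.countP (fun g => 70 ≤ g)) := by
  induction l generalizing f p m d with
  | nil => simp
  | cons i t ih =>
    simp only [List.foldl_cons, List.countP_cons]
    by_cases h1 : i < 50
    · rw [if_pos h1, ih]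
      simp only [Prod.ext_iff]
      simp [h1, show ¬(50 ≤ i ∧ i < 60) by omega, show ¬(60 ≤ i ∧ i < 70) by omega,
            show ¬(70 ≤ i) by omega] <;> omega
    · by_cases h2 : i < 60
      · rw [if_neg h1, if_pos (show (50 ≤ i ∧ i < 60) by omega), ih]
        simp only [Prod.ext_iff]
        simp [h1, show (50 ≤ i ∧ i < 60) by omega, show ¬(60 ≤ i ∧ i < 70) by omega,
              show ¬(70 ≤ i) by omega] <;> omega
      · by_cases h3 : i < 70
        · rw [if_neg h1, if_neg (show ¬(50 ≤ i ∧ i < 60) by omega),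
              if_pos (show (60 ≤ i ∧ i < 70) by omega), ih]
          simp only [Prod.ext_iff]
          simp [h1, show ¬(50 ≤ i ∧ i < 60) by omega, show (60 ≤ i ∧ i < 70) by omega,
                show ¬(70 ≤ i) by omega] <;> omega
        · rw [if_neg h1, if_neg (show ¬(50 ≤ i ∧ i < 60) by omega),
              if_neg (show ¬(60 ≤ i ∧ i < 70) by omega), if_pos (show (70 ≤ i) by omega), ih]
          simp only [Prod.ext_iff]
          simp [h1, show ¬(50 ≤ i ∧ i < 60) by omega, show ¬(60 ≤ i ∧ i < 70) by omega,
                show (70 ≤ i) by omega] <;> omega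

-- Splitting cumulative counts: count below a higher bound = count below the lower + count in between.
lemma count_split (l : List Int) (a b : Int) (hab : a ≤ b) :
    l.countP (fun g => g < b) = l.countP (fun g => g < a) + l.countP (fun g => a ≤ g ∧ g < b) := by
  induction l with
  | nil => simp
  | cons i t ih =>
    simp only [List.countP_cons]
    by_cases h1 : i < a
    · simp [h1, show i < b by omega, show ¬ a ≤ i by omega, ih]; omega
    · by_cases h2 : i < b
      · simp [h1, h2, show a ≤ i by omega, ih]; omega
      · simp [h1, h2, ih]

lemma count_top (l : List Int) (b : Int) :
    (l.length : Int) = l.countP (fun g => g < b) + l.countP (fun g => b ≤ g) := by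
  induction l with
  | nil => simp
  | cons i t ih =>
    simp only [List.countP_cons, List.length_cons]
    by_cases h : i < b
    · simp [h, show ¬ b ≤ i by omega]; omega
    · simp [h, show b ≤ i by omega]; omega

-- ===== VERDICT (by name: the statement is the Claim_ definition above) =====
theorem classify_grades_spec : Claim_equal_classify_grades := by
  intro l _
  unfold Spec_classify_grades classify_grades classify_grades_alt
  rw [classify_grades_fold]
  have h1 := count_split l 50 60 (by norm_num)
  have h2 := count_split l 60 70 (by norm_num)
  have h3 := count_top l 70
  simp only [List.cons.injEq, and_true]
  refine ⟨by omega, by omega, by omega, by omega⟩
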